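-- pv_equiv track=rewrite | github.com/luthfy13/additional-feature-word-level-vs-vector-level-in-sentiment-analysis | NegationHandlingBaseline.py | baseline_next_following_word
-- ===== SOURCE A (Python) =====
-- from typing import List, Dict, Set, Tuple
--
-- NEG_CUE_VAL = 1  # Negation cue words
--
-- NEG_TOKEN_VAL = 2  # Words within scope of negation
--
-- neg_cues: Set[str] = set([
--     "tidak", "tak", "bukan", "takkan", "tiada", "jangan", "belum",
--     "tanpa", "pantang", "non", "tdk", "ndak", "gak", "enggak",
--     "ngak", "nggak", "ga", "gaada", "ngga", "gk", "kaga", "kagak",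
--     "nggk", "engga"
-- ])
--
-- def baseline_next_following_word(text: str) -> Tuple[List[str], List[int]]:
--     """
--     Baseline 3: Next Following Word
--     Marks only the word immediately following the negation cue
--     """
--     tokens = text.lower().split()
--     negation_vector = [0] * len(tokens)
--
--     for i, token in enumerate(tokens):
--         if token in neg_cues:
--             negation_vector[i] = NEG_CUE_VAL
--             # Mark the next word if it exists
--             if i+1 < len(tokens):
--                 negation_vector[i+1] = NEG_TOKEN_VAL
--
--     return tokens, negation_vector
-- ===== SOURCE B (Python) =====
-- from typing import List, Tuple
--
-- NEG_CUE_VAL = 1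
-- NEG_TOKEN_VAL = 2
--
-- neg_cues = set([
--     "tidak", "tak", "bukan", "takkan", "tiada", "jangan", "belum",
--     "tanpa", "pantang", "non", "tdk", "ndak", "gak", "enggak",
--     "ngak", "nggak", "ga", "gaada", "ngga", "gk", "kaga", "kagak",
--     "nggk", "engga"
-- ])
--
-- def baseline_next_following_word(text: str) -> Tuple[List[str], List[int]]:
--     """One forward pass that looks BEHIND: a token is 1 if it is a cue,
--     else 2 if the previous token was a cue, else 0. No pre-allocated
--     vector and no write-ahead mutation."""
--     tokens = text.lower().split()
--     vector: List[int] = []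
--     prev_is_cue = False
--     for token in tokens:
--         if token in neg_cues:
--             vector.append(NEG_CUE_VAL)
--             prev_is_cue = True
--         else:
--             vector.append(NEG_TOKEN_VAL if prev_is_cue else 0)
--             prev_is_cue = False
--     return tokens, vector
-- ===== Notes on version B (the rewrite author's own statement) =====
-- stated objective: simpler
-- what changed: Replaces A's pre-allocated vector with look-ahead mutation (writing 2 into slot i+1, later overwritten to 1 if that word is itself a cue) by a single look-behind pass that appends each slot's final value directly, computed from the current token and a prev-is-cue flag.
import Mathlib
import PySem

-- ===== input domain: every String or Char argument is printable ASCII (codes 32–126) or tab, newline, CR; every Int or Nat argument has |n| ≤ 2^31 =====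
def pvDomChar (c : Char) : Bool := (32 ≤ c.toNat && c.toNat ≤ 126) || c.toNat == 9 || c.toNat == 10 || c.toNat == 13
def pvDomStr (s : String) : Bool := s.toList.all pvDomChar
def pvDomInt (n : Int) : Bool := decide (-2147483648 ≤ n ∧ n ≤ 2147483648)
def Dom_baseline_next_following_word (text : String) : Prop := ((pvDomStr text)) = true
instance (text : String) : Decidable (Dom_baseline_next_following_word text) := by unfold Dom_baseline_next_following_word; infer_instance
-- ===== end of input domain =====

-- B replaces A's write-ahead mutation of a pre-allocated vector by a single look-behind pass
-- that appends each slot's final value (objective: simpler); return values proved equal.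


-- ===== PORT A =====
def negCues : List String :=
  ["tidak", "tak", "bukan", "takkan", "tiada", "jangan", "belum",
   "tanpa", "pantang", "non", "tdk", "ndak", "gak", "enggak",
   "ngak", "nggak", "ga", "gaada", "ngga", "gk", "kaga", "kagak",
   "nggk", "engga"]

def baseline_next_following_word (text : String) : List String × List Int :=
  let tokens := PySem.Str.split₀ (PySem.Str.lower text)
  let negation_vector : List Int := List.replicate tokens.length 0
  let negation_vector :=
    (PySem.List.enumerate tokens).foldl (fun v (p : Int × String) =>
      if negCues.contains p.2 then
        let v := v.set p.1.toNat 1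
        if p.1 + 1 < (tokens.length : Int) then v.set (p.1 + 1).toNat 2 else v
      else v) negation_vector
  (tokens, negation_vector)

-- ===== PORT B =====
def bStep (st : List Int × Bool) (token : String) : List Int × Bool :=
  if negCues.contains token then (st.1 ++ [1], true)
  else (st.1 ++ [if st.2 then 2 else 0], false)

def baseline_next_following_word_alt (text : String) : List String × List Int :=
  let tokens := PySem.Str.split₀ (PySem.Str.lower text)
  (tokens, (tokens.foldl bStep ([], false)).1)

-- ===== PRECONDITION & SPEC =====
def Spec_baseline_next_following_word (text : String) (out : List String × List Int) : Prop := out = baseline_next_following_word_alt text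
instance (text : String) (out : List String × List Int) : Decidable (Spec_baseline_next_following_word text out) := by unfold Spec_baseline_next_following_word; infer_instance

-- ===== CLAIM (what is proved, stated in full; the proofs are below) =====
def Claim_equal_baseline_next_following_word : Prop := ∀ (text : String), Dom_baseline_next_following_word text → Spec_baseline_next_following_word text (baseline_next_following_word text)

-- ===== LEMMAS AND PROOFS =====

-- proof-side cons-form of B's loop: slot value for each token from the prev-is-cue flag
def bVec : List String → Bool → List Int
  | [], _ => []
  | t :: rest, b =>
      if negCues.contains t then 1 :: bVec rest true
      else (if b then 2 else 0) :: bVec rest false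

lemma bStep_foldl (toks : List String) : ∀ (acc : List Int) (b : Bool),
    (toks.foldl bStep (acc, b)).1 = acc ++ bVec toks b := by
  induction toks with
  | nil => intro acc b; simp [bVec]
  | cons t rest ih =>
      intro acc b
      by_cases h : negCues.contains t
      · have h' : t ∈ negCues := by simp at h; exact h
        simp [bStep, bVec, h', ih]
      · have h' : t ∉ negCues := by simp at h; exact h
        simp [bStep, bVec, h', ih]

-- the tail of A's vector from position pre.length on, before the suffix is processed
def padTail : List String → Bool → List Int
  | [], _ => []
  | _ :: rest, b => (if b then 2 else 0) :: List.replicate rest.length 0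

lemma set_mid (pre : List Int) (x y : Int) (l : List Int) :
    (pre ++ x :: l).set pre.length y = pre ++ y :: l := by
  induction pre with
  | nil => simp
  | cons a pre ih => simp [ih]

lemma padTail_false (xs : List String) : padTail xs false = List.replicate xs.length 0 := by
  cases xs <;> simp [padTail, List.replicate_succ]

lemma aLoop_key (N : Nat) (toks : List String) : ∀ (pre : List Int) (b : Bool),
    pre.length + toks.length = N →
    (PySem.List.enumerate toks (pre.length : Int)).foldl (fun v (p : Int × String) =>
      if negCues.contains p.2 then
        let v := v.set p.1.toNat 1
        if p.1 + 1 < (N : Int) then v.set (p.1 + 1).toNat 2 else v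
      else v) (pre ++ padTail toks b) = pre ++ bVec toks b := by
  set f : List Int → Int × String → List Int := (fun v (p : Int × String) =>
      if negCues.contains p.2 then
        let v := v.set p.1.toNat 1
        if p.1 + 1 < (N : Int) then v.set (p.1 + 1).toNat 2 else v
      else v) with hf
  induction toks with
  | nil => intro pre b _; simp [padTail, bVec, PySem.List.enumerate]
  | cons t rest ih =>
      intro pre b hN
      rw [PySem.List.enumerate_cons, List.foldl_cons]
      by_cases h : negCues.contains t
      · cases rest with
        | nil =>
            have hnlt : ¬ ((pre.length : Int) + 1 < (N : Int)) := by
              simp at hN; omega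
            have hacc : f (pre ++ padTail [t] b) ((pre.length : Int), t)
                = pre ++ [(1 : Int)] := by
              rw [hf]; simp only [h, if_true, hnlt, if_false, padTail]
              rw [show ((pre.length : Int)).toNat = pre.length by simp]
              rw [show pre ++ [(1:Int)] = pre ++ (1:Int) :: [] from rfl]
              exact set_mid pre _ 1 []
            rw [hacc]
            have h' : t ∈ negCues := by simp at h; exact h
            simp [PySem.List.enumerate, bVec, h']
        | cons r rs =>
            have hlt : (pre.length : Int) + 1 < (N : Int) := by
              simp at hN; omega
            have hacc : f (pre ++ padTail (t :: r :: rs) b) ((pre.length : Int), t)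
                = (pre ++ [(1 : Int)]) ++ padTail (r :: rs) true := by
              rw [hf]; simp only [h, if_true, hlt, padTail, List.length_cons,
                List.replicate_succ]
              rw [show ((pre.length : Int)).toNat = pre.length by simp, set_mid]
              rw [show ((pre.length : Int) + 1).toNat = (pre ++ [(1:Int)]).length by simp]
              rw [show pre ++ (1:Int) :: (0:Int) :: List.replicate rs.length 0
                    = (pre ++ [(1:Int)]) ++ (0:Int) :: List.replicate rs.length 0 by simp, set_mid]
            rw [hacc]
            have hstep := ih (pre ++ [(1:Int)]) true (by simp at hN ⊢; omega)
            rw [show ((pre ++ [(1:Int)]).length : Int) = (pre.length : Int) + 1 by simp] at hstep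
            rw [hstep]
            have h' : t ∈ negCues := by simp at h; exact h
            simp [bVec, h']
      · have hacc : pre ++ padTail (t :: rest) b
            = (pre ++ [if b then (2:Int) else 0]) ++ padTail rest false := by
          rw [padTail_false]; simp [padTail]
        have hskip : f (pre ++ padTail (t :: rest) b) ((pre.length : Int), t)
            = (pre ++ [if b then (2:Int) else 0]) ++ padTail rest false := by
          rw [hf]; simp only [h, if_false, Bool.false_eq_true]
          exact hacc
        rw [hskip]
        have hstep := ih (pre ++ [if b then (2:Int) else 0]) false (by simp at hN ⊢; omega)
        rw [show ((pre ++ [if b then (2:Int) else 0]).length : Int) = (pre.length : Int) + 1 by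
              simp] at hstep
        rw [hstep]
        have h' : t ∉ negCues := by simp at h; exact h
        simp [bVec, h']

-- ===== VERDICT (by name: the statement is the Claim_ definition above) =====
theorem baseline_next_following_word_spec : Claim_equal_baseline_next_following_word := by
  intro text _
  unfold Spec_baseline_next_following_word baseline_next_following_word baseline_next_following_word_alt
  have h := aLoop_key (PySem.Str.split₀ (PySem.Str.lower text)).length
    (PySem.Str.split₀ (PySem.Str.lower text)) [] false (by simp)
  rw [padTail_false] at h
  simp only [List.nil_append, List.length_nil, Nat.cast_zero] at h
  dsimp only
  rw [bStep_foldl]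
  simp only [List.nil_append]
  rw [h]
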